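-- pv_equiv track=rewrite | github.com/LukhasAI/Lukhas_PWM | BACKUP_BEFORE_CONSOLIDATION_20250801_002312/quantum/systems/bio_integration/connectivity_consolidator.py | _extract_import_patterns
-- ===== SOURCE A (Python) =====
-- from typing import Dict, List, Any, Optional, Tuple, Set
--
-- def _extract_import_patterns(content: str) -> Dict[str, Any]:
--     """Extract import patterns from file content"""
--     patterns = {
--         'imports': [],
--         'from_imports': [],
--         'relative_imports': []
--     }
--
--     lines = content.split('\n')
--     for line in lines:
--         line = line.strip()
--         if line.startswith('import '):
--             patterns['imports'].append(line)
--         elif line.startswith('from '):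
--             patterns['from_imports'].append(line)
--             if line.startswith('from .'):
--                 patterns['relative_imports'].append(line)
--
--     return patterns
-- ===== SOURCE B (Python) =====
-- def _extract_import_patterns(content: str) -> dict:
--     """Same categorization, built by three independent filter passes over the stripped lines."""
--     stripped = [line.strip() for line in content.split('\n')]
--     return {
--         'imports': [l for l in stripped if l.startswith('import ')],
--         'from_imports': [l for l in stripped if l.startswith('from ')],
--         'relative_imports': [l for l in stripped if l.startswith('from .')],
--     }
-- ===== Notes on version B (the rewrite author's own statement) =====
-- stated objective: simpler
-- what changed: Replaces the single classifying loop with nested branches by one strip pass plus three independent filter comprehensions (using that 'from .' implies 'from '), returning the dict built in one expression.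
import Mathlib
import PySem

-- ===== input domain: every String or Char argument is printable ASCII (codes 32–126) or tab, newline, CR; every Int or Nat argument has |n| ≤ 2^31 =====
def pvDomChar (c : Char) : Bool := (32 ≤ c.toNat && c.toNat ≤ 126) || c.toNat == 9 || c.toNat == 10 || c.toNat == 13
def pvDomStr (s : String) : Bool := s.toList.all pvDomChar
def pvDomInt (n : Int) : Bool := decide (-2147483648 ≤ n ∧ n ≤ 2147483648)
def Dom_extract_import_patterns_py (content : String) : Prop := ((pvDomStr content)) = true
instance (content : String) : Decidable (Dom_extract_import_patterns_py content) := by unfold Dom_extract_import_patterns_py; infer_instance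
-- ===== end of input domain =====

-- B replaces A's single classifying loop (nested branches, three mutable buckets) by one
-- strip pass plus three independent filter passes; same return value, objective: simpler.

-- ===== PORT A =====
-- A: one pass over the lines, stripping each and appending into the matching bucket(s).
def pvStepA (st : List String × List String × List String) (line : String) :
    List String × List String × List String :=
  let line := PySem.Str.strip line
  if PySem.Str.startswith line "import " then (st.1 ++ [line], st.2.1, st.2.2)
  else if PySem.Str.startswith line "from " then
    if PySem.Str.startswith line "from ." then (st.1, st.2.1 ++ [line], st.2.2 ++ [line])
    else (st.1, st.2.1 ++ [line], st.2.2)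
  else st

def extract_import_patterns_py (content : String) : List (String × List String) :=
  let r := ((PySem.Chars.splitOn content.toList ['\n']).map String.mk).foldl pvStepA ([], [], [])
  [("imports", r.1), ("from_imports", r.2.1), ("relative_imports", r.2.2)]

-- ===== PORT B =====
-- B: strip every line once, then build each bucket by an independent filter.
def extract_import_patterns_py_alt (content : String) : List (String × List String) :=
  let stripped := ((PySem.Chars.splitOn content.toList ['\n']).map String.mk).map PySem.Str.strip
  [("imports", stripped.filter (fun l => PySem.Str.startswith l "import ")),
   ("from_imports", stripped.filter (fun l => PySem.Str.startswith l "from ")),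
   ("relative_imports", stripped.filter (fun l => PySem.Str.startswith l "from ."))]

-- ===== PRECONDITION & SPEC =====
def Spec_extract_import_patterns_py (content : String) (out : List (String × List String)) : Prop := out = extract_import_patterns_py_alt content
instance (content : String) (out : List (String × List String)) : Decidable (Spec_extract_import_patterns_py content out) := by unfold Spec_extract_import_patterns_py; infer_instance

-- ===== CLAIM (what is proved, stated in full; the proofs are below) =====
def Claim_equal_extract_import_patterns_py : Prop := ∀ (content : String), Dom_extract_import_patterns_py content → Spec_extract_import_patterns_py content (extract_import_patterns_py content)

-- ===== LEMMAS AND PROOFS =====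

-- a line starting with "from ." also starts with "from "
theorem pv_from_dot_imp (s : String) (h : PySem.Str.startswith s "from ." = true) :
    PySem.Str.startswith s "from " = true := by
  simp only [PySem.Str.startswith_eq, PySem.Chars.startswith_iff] at h ⊢
  exact List.IsPrefix.trans (by decide) h

theorem pv_foldl_inv (ls : List String) (a b c : List String) :
    ls.foldl pvStepA (a, b, c) =
      (a ++ (ls.map PySem.Str.strip).filter (fun l => PySem.Str.startswith l "import "),
       b ++ (ls.map PySem.Str.strip).filter (fun l => PySem.Str.startswith l "from "),
       c ++ (ls.map PySem.Str.strip).filter (fun l => PySem.Str.startswith l "from .")) := by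
  induction ls generalizing a b c with
  | nil => simp
  | cons l ls ih =>
    simp only [List.foldl_cons, List.map_cons, List.filter_cons]
    rw [pvStepA]
    by_cases h1 : PySem.Str.startswith (PySem.Str.strip l) "import " = true
    · have h2 : PySem.Str.startswith (PySem.Str.strip l) "from " = false := by
        by_contra hc
        have h2' := Bool.not_eq_false _ |>.mp hc
        simp only [PySem.Str.startswith_eq, PySem.Chars.startswith_iff] at h1 h2'
        rcases h1 with ⟨t1, e1⟩; rcases h2' with ⟨t2, e2⟩
        rw [← e1] at e2
        have := congrArg (fun xs => xs.headD ' ') e2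
        simp at this
      have h3 : PySem.Str.startswith (PySem.Str.strip l) "from ." = false := by
        cases h : PySem.Str.startswith (PySem.Str.strip l) "from ." with
        | false => rfl
        | true => exact absurd (pv_from_dot_imp _ h) (by simp only [h2]; decide)
      simp only [h1, h2, h3, if_true, if_false, Bool.false_eq_true]
      rw [ih]
      simp
    · by_cases h2 : PySem.Str.startswith (PySem.Str.strip l) "from " = true
      · by_cases h3 : PySem.Str.startswith (PySem.Str.strip l) "from ." = true
        · simp only [h1, h2, h3, if_true, if_false, Bool.false_eq_true]
          rw [ih]; simp
        · simp only [h1, h2, h3, if_true, if_false, Bool.false_eq_true]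
          rw [ih]; simp
      · have h3 : PySem.Str.startswith (PySem.Str.strip l) "from ." = false := by
          cases h : PySem.Str.startswith (PySem.Str.strip l) "from ." with
          | false => rfl
          | true => exact absurd (pv_from_dot_imp _ h) h2
        simp only [h1, h2, h3, if_false, Bool.false_eq_true]
        rw [ih]

-- ===== VERDICT (by name: the statement is the Claim_ definition above) =====
theorem extract_import_patterns_py_spec : Claim_equal_extract_import_patterns_py := by
  intro content _
  unfold Spec_extract_import_patterns_py extract_import_patterns_py extract_import_patterns_py_alt
  rw [pv_foldl_inv]
  simp
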